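-- pv_equiv track=rewrite | github.com/FesenkoE/Python-Basic | lesson7/class_work/sort_list.py | sort_ascending
-- ===== SOURCE A (Python) =====
-- def sort_ascending(x):
--     tmp = sorted([i for i in x if i != -1])
--     sorted_list = []
--     idx = 0
--     for i in x:
--         if i != -1:
--             sorted_list.append(tmp[idx])
--             idx += 1
--         else:
--             sorted_list.append(i)
--     return sorted_list
-- ===== SOURCE B (Python) =====
-- def sort_ascending(x):
--     vals = [v for v in x if v != -1]
--     out = []
--     for v in x:
--         if v == -1:
--             out.append(v)
--         else:
--             m = min(vals)
--             vals.remove(m)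
--             out.append(m)
--     return out
-- ===== Notes on version B (the rewrite author's own statement) =====
-- stated objective: alternative
-- what changed: B never sorts: in a single pass it fills each non-(-1) slot by extracting the minimum of the values still remaining (selection by repeated min-removal), instead of A's sort-once-then-reinsert with a running index.
import Mathlib
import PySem

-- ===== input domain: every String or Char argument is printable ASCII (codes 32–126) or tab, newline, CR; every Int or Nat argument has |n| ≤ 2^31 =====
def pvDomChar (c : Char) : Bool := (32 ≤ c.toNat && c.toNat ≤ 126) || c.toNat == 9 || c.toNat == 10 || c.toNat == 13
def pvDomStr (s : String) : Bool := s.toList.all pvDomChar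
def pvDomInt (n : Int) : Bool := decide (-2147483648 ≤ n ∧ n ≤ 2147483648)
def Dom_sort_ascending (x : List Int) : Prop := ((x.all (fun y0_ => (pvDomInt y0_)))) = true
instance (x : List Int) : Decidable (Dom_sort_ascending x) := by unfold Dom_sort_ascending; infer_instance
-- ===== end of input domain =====

-- B never sorts: one pass fills each non-(-1) slot with the minimum of the values still
-- remaining (selection by repeated min-removal) instead of A's sort-then-reinsert (objective: alternative).

-- ===== PORT A =====
def sort_ascending (x : List Int) : List Int :=
  let tmp := PySem.List.sorted (x.filter (fun i => i != -1)) (fun v => v) false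
  (x.foldl (fun (st : List Int × Int) i =>
      if i != -1 then (st.1 ++ [(PySem.List.pyGet? tmp st.2).getD 0], st.2 + 1)
      else (st.1 ++ [i], st.2)) ([], 0)).1

-- ===== PORT B =====
def sort_ascending_alt (x : List Int) : List Int :=
  (x.foldl (fun (st : List Int × List Int) v =>
      if v == -1 then (st.1, st.2 ++ [v])
      else
        let m := (PySem.List.min? st.1 (fun y => y)).getD 0
        ((PySem.List.remove? st.1 m).getD st.1, st.2 ++ [m]))
    (x.filter (fun v => v != -1), [])).2

-- ===== PRECONDITION & SPEC =====
def Spec_sort_ascending (x : List Int) (out : List Int) : Prop := out = sort_ascending_alt x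
instance (x : List Int) (out : List Int) : Decidable (Spec_sort_ascending x out) := by unfold Spec_sort_ascending; infer_instance

-- ===== CLAIM =====
def Claim_equal_sort_ascending : Prop := ∀ (x : List Int), Dom_sort_ascending x → Spec_sort_ascending x (sort_ascending x)

-- ===== LEMMAS AND PROOFS =====

/-- Common intermediate: consume a value list left-to-right, keep -1 in place. -/
def pvInterleave : List Int → List Int → List Int
  | [], _ => []
  | i :: xs, tmp =>
    if i != -1 then tmp.head?.getD 0 :: pvInterleave xs tmp.tail
    else i :: pvInterleave xs tmp

lemma pvFoldlMin_mem (t : List Int) : ∀ (v : Int), t.foldl min v ∈ v :: t := by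
  induction t with
  | nil => intro v; simp
  | cons a t ih =>
    intro v
    simp only [List.foldl_cons]
    rcases List.mem_cons.mp (ih (min v a)) with h | h
    · rcases min_choice v a with h' | h' <;> rw [h, h'] <;> simp
    · simp [h]

lemma pvFoldlMin_le (t : List Int) : ∀ (v y : Int), y ∈ v :: t → t.foldl min v ≤ y := by
  induction t with
  | nil =>
    intro v y hy
    rcases List.mem_cons.mp hy with h | h
    · simp [h]
    · simp at h
  | cons a t ih =>
    intro v y hy
    simp only [List.foldl_cons]
    rcases List.mem_cons.mp hy with h | h
    · subst h
      exact le_trans (ih (min y a) (min y a) (List.mem_cons_self ..)) (min_le_left _ _)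
    rcases List.mem_cons.mp h with h | h
    · subst h
      exact le_trans (ih (min v y) (min v y) (List.mem_cons_self ..)) (min_le_right _ _)
    · exact ih (min v a) y (List.mem_cons_of_mem _ h)

/-- Selection sort by repeated extraction of the minimum (fuel = length). -/
def pvSelSortF : Nat → List Int → List Int
  | 0, _ => []
  | _ + 1, [] => []
  | n + 1, v :: t => t.foldl min v :: pvSelSortF n ((v :: t).erase (t.foldl min v))

def pvSelSort (l : List Int) : List Int := pvSelSortF l.length l

lemma pvSelSort_nil : pvSelSort [] = [] := rfl

lemma pvSelSortF_cons_len (v : Int) (t : List Int) :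
    ((v :: t).erase (t.foldl min v)).length = t.length := by
  rw [List.length_erase_of_mem (pvFoldlMin_mem t v)]
  simp

lemma pvSelSort_cons (v : Int) (t : List Int) :
    pvSelSort (v :: t) = t.foldl min v :: pvSelSort ((v :: t).erase (t.foldl min v)) := by
  show pvSelSortF (t.length + 1) (v :: t) = _
  rw [pvSelSortF, pvSelSort, pvSelSortF_cons_len]

lemma pvSelSortF_perm : ∀ (n : Nat) (l : List Int), l.length = n → (pvSelSortF n l).Perm l := by
  intro n
  induction n with
  | zero =>
    intro l h
    rw [List.length_eq_zero_iff.mp h]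
    exact List.Perm.refl _
  | succ n ih =>
    intro l h
    cases l with
    | nil => exact List.Perm.refl _
    | cons v t =>
      rw [pvSelSortF]
      have hlen : ((v :: t).erase (t.foldl min v)).length = n := by
        rw [pvSelSortF_cons_len]; simpa using h
      exact (((ih _ hlen).cons _).trans (List.perm_cons_erase (pvFoldlMin_mem t v)).symm)

lemma pvSelSort_perm (l : List Int) : (pvSelSort l).Perm l := pvSelSortF_perm l.length l rfl

lemma pvSelSortF_pairwise : ∀ (n : Nat) (l : List Int), l.length = n →
    (pvSelSortF n l).Pairwise (· ≤ ·) := by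
  intro n
  induction n with
  | zero => intro l h; simp [pvSelSortF]
  | succ n ih =>
    intro l h
    cases l with
    | nil => simp [pvSelSortF]
    | cons v t =>
      rw [pvSelSortF]
      have hlen : ((v :: t).erase (t.foldl min v)).length = n := by
        rw [pvSelSortF_cons_len]; simpa using h
      refine List.pairwise_cons.mpr ⟨?_, ih _ hlen⟩
      intro y hy
      have hy' : y ∈ (v :: t).erase (t.foldl min v) :=
        (pvSelSortF_perm n _ hlen).mem_iff.mp hy
      exact pvFoldlMin_le t v y (List.mem_of_mem_erase hy')

lemma pvSelSort_pairwise (l : List Int) : (pvSelSort l).Pairwise (· ≤ ·) :=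
  pvSelSortF_pairwise l.length l rfl

lemma pvSelSort_eq_sorted (l : List Int) :
    PySem.List.sorted l (fun v => v) false = pvSelSort l :=
  PySem.List.sorted_id_eq_of_perm_of_pairwise l (pvSelSort l)
    (pvSelSort_perm l) (pvSelSort_pairwise l)

/-- Proof-side name for B's loop body (definitionally the lambda in the port). -/
def pvStepB (st : List Int × List Int) (v : Int) : List Int × List Int :=
  if v == -1 then (st.1, st.2 ++ [v])
  else
    let m := (PySem.List.min? st.1 (fun y => y)).getD 0
    ((PySem.List.remove? st.1 m).getD st.1, st.2 ++ [m])

lemma pvStepB_sent (st : List Int × List Int) : pvStepB st (-1) = (st.1, st.2 ++ [-1]) := by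
  simp [pvStepB]

lemma pvStepB_nil (acc : List Int) (v : Int) (hv : (v == -1) = false) :
    pvStepB ([], acc) v = ([], acc ++ [0]) := by
  simp only [pvStepB, hv, Bool.false_eq_true, if_false]
  rfl

lemma pvStepB_cons (w : Int) (t acc : List Int) (v : Int) (hv : (v == -1) = false) :
    pvStepB (w :: t, acc) v
      = ((w :: t).erase (t.foldl min w), acc ++ [t.foldl min w]) := by
  simp only [pvStepB, hv, Bool.false_eq_true, if_false, PySem.List.min?_id_cons,
    Option.getD_some,
    PySem.List.remove?_eq_some_erase (w :: t) (t.foldl min w) (pvFoldlMin_mem t w)]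

lemma pvA_loop (xs : List Int) : ∀ (tmp acc : List Int) (n : Nat),
    (xs.foldl (fun (st : List Int × Int) i =>
      if i != -1 then (st.1 ++ [(PySem.List.pyGet? tmp st.2).getD 0], st.2 + 1)
      else (st.1 ++ [i], st.2)) (acc, (n : Int))).1 = acc ++ pvInterleave xs (tmp.drop n) := by
  induction xs with
  | nil => intro tmp acc n; simp [pvInterleave]
  | cons i xs ih =>
    intro tmp acc n
    by_cases hi : (i != -1) = true
    · have h1 : (n : Int) + 1 = ((n + 1 : Nat) : Int) := by push_cast; ring
      simp only [List.foldl_cons, if_pos hi, h1, ih]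
      simp [pvInterleave, hi, PySem.List.pyGet?_natCast, List.head?_drop, List.tail_drop]
    · simp only [List.foldl_cons, if_neg hi]
      rw [ih]
      simp [pvInterleave, hi]

lemma pvB_loop (xs : List Int) : ∀ (vals acc : List Int),
    (xs.foldl pvStepB (vals, acc)).2 = acc ++ pvInterleave xs (pvSelSort vals) := by
  induction xs with
  | nil => intro vals acc; simp [pvInterleave]
  | cons v xs ih =>
    intro vals acc
    by_cases hv : v = -1
    · subst hv
      rw [List.foldl_cons, pvStepB_sent, ih]
      simp [pvInterleave]
    · have hv' : (v == -1) = false := by simpa using hv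
      have hv'' : (v != -1) = true := by simpa using hv
      cases vals with
      | nil =>
        rw [List.foldl_cons, pvStepB_nil acc v hv', ih]
        simp [pvInterleave, hv'', pvSelSort_nil]
      | cons w t =>
        rw [List.foldl_cons, pvStepB_cons w t acc v hv', ih]
        simp [pvInterleave, hv'', pvSelSort_cons]

-- ===== VERDICT =====
theorem sort_ascending_spec : Claim_equal_sort_ascending := by
  intro x _
  show sort_ascending x = sort_ascending_alt x
  have hA := pvA_loop x (PySem.List.sorted (x.filter (fun i => i != -1)) (fun v => v) false) [] 0
  simp only [Nat.cast_zero, List.drop_zero, List.nil_append] at hA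
  have hB := pvB_loop x (x.filter (fun v => v != -1)) []
  simp only [List.nil_append] at hB
  simp only [sort_ascending, sort_ascending_alt]
  rw [hA]
  rw [show (x.foldl (fun (st : List Int × List Int) v =>
      if v == -1 then (st.1, st.2 ++ [v])
      else
        let m := (PySem.List.min? st.1 (fun y => y)).getD 0
        ((PySem.List.remove? st.1 m).getD st.1, st.2 ++ [m]))
      (x.filter (fun v => v != -1), [])).2
    = (x.foldl pvStepB (x.filter (fun v => v != -1), [])).2 from rfl]
  rw [hB, pvSelSort_eq_sorted]
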